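-- pv_equiv track=rewrite | github.com/google-research/google-research | felix/converter_for_felix_insert.py | _get_added_token_lists
-- ===== SOURCE A (Python) =====
-- def _get_added_token_lists(kept_tokens,
--                            target_tokens):
--   """Return a list of added tokens lists next to every kept token."""
--   added_phrases = []
--   # Index of the `kept_tokens` element that we are currently looking for.
--   kept_idx = 0
--   phrase = []
--   for token in target_tokens:
--     if kept_idx < len(kept_tokens) and token == kept_tokens[kept_idx]:
--       kept_idx += 1
--       added_phrases.append(phrase)
--       phrase = []
--     else:
--       phrase.append(token)
--   added_phrases.append(phrase)
--   return added_phrases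
-- ===== SOURCE B (Python) =====
-- def _get_added_token_lists(kept_tokens, target_tokens):
--   """Return a list of added tokens lists next to every kept token."""
--   # Pass 1: indices in target_tokens that greedily match kept_tokens in order.
--   splits = []
--   kept_idx = 0
--   for i, token in enumerate(target_tokens):
--     if kept_idx < len(kept_tokens) and token == kept_tokens[kept_idx]:
--       splits.append(i)
--       kept_idx += 1
--   # Pass 2: the phrases are the slices between consecutive split points.
--   result = []
--   start = 0
--   for p in splits:
--     result.append(target_tokens[start:p])
--     start = p + 1
--   result.append(target_tokens[start:])
--   return result
-- ===== Notes on version B (the rewrite author's own statement) =====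
-- stated objective: alternative
-- what changed: B replaces A's single loop that accumulates the current phrase token-by-token with two passes: first record the indices of greedily matched kept tokens, then build the result by slicing target_tokens between consecutive split points.
import Mathlib
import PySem

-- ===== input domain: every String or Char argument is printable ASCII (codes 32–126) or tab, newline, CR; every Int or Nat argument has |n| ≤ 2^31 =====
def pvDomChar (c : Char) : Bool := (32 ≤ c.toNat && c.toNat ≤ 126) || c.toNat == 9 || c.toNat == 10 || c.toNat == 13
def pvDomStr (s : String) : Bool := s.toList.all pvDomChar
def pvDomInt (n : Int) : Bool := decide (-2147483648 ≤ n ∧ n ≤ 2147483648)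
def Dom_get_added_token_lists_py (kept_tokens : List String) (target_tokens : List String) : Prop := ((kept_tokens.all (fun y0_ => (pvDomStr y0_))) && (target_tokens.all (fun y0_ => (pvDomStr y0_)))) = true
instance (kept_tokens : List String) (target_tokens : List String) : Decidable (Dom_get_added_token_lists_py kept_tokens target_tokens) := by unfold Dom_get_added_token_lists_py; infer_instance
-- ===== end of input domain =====

-- B builds the same phrases by a two-pass split-index decomposition instead of A's
-- incremental phrase accumulator; same value everywhere (objective: alternative).

-- ===== PORT A =====
-- state: (added_phrases, kept_idx, phrase); kept_idx stays a Nat (always ≥ 0 in A)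
def get_added_token_lists_py (kept_tokens : List String) (target_tokens : List String) : List (List String) :=
  let st := target_tokens.foldl
    (fun (s : List (List String) × Nat × List String) token =>
      if s.2.1 < kept_tokens.length ∧ token = kept_tokens.getD s.2.1 "" then
        (s.1 ++ [s.2.2], s.2.1 + 1, [])
      else
        (s.1, s.2.1, s.2.2 ++ [token]))
    ([], 0, [])
  st.1 ++ [st.2.2]

-- ===== PORT B =====
-- pass 1 over enumerate(target_tokens): collect split indices; pass 2: slices between them
def get_added_token_lists_py_alt (kept_tokens : List String) (target_tokens : List String) : List (List String) :=
  let sp := (PySem.List.enumerate target_tokens).foldl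
    (fun (s : List Int × Nat) it =>
      if s.2 < kept_tokens.length ∧ it.2 = kept_tokens.getD s.2 "" then
        (s.1 ++ [it.1], s.2 + 1)
      else s)
    ([], 0)
  let st := sp.1.foldl
    (fun (s : List (List String) × Int) p =>
      (s.1 ++ [PySem.List.slice target_tokens (some s.2) (some p)], p + 1))
    ([], 0)
  st.1 ++ [PySem.List.slice target_tokens (some st.2) none]

-- ===== PRECONDITION & SPEC =====
def Spec_get_added_token_lists_py (kept_tokens : List String) (target_tokens : List String) (out : List (List String)) : Prop := out = get_added_token_lists_py_alt kept_tokens target_tokens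
instance (kept_tokens : List String) (target_tokens : List String) (out : List (List String)) : Decidable (Spec_get_added_token_lists_py kept_tokens target_tokens out) := by unfold Spec_get_added_token_lists_py; infer_instance

-- ===== CLAIM (what is proved, stated in full; the proofs are below) =====
def Claim_equal_get_added_token_lists_py : Prop := ∀ (kept_tokens : List String) (target_tokens : List String), Dom_get_added_token_lists_py kept_tokens target_tokens → Spec_get_added_token_lists_py kept_tokens target_tokens (get_added_token_lists_py kept_tokens target_tokens)

-- ===== LEMMAS AND PROOFS =====

-- common recursive specification of the result
def gatSpec (kept : List String) (k : Nat) : List String → List (List String)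
  | [] => [[]]
  | t :: ts =>
      if k < kept.length ∧ t = kept.getD k "" then
        [] :: gatSpec kept (k + 1) ts
      else
        (gatSpec kept k ts).modifyHead (t :: ·)

theorem gatSpec_ne_nil (kept : List String) (ts : List String) :
    ∀ k, gatSpec kept k ts ≠ [] := by
  induction ts with
  | nil => intro k; simp [gatSpec]
  | cons t ts ih =>
      intro k
      unfold gatSpec
      split
      · simp
      · cases h : gatSpec kept k ts with
        | nil => exact absurd h (ih k)
        | cons hd tl => simp

-- A's fold equals gatSpec
theorem portA_fold (kept : List String) (ts : List String) :
    ∀ (acc : List (List String)) (k : Nat) (ph : List String),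
    (ts.foldl
        (fun (s : List (List String) × Nat × List String) token =>
          if s.2.1 < kept.length ∧ token = kept.getD s.2.1 "" then
            (s.1 ++ [s.2.2], s.2.1 + 1, [])
          else
            (s.1, s.2.1, s.2.2 ++ [token]))
        (acc, k, ph)).1
    ++ [(ts.foldl
        (fun (s : List (List String) × Nat × List String) token =>
          if s.2.1 < kept.length ∧ token = kept.getD s.2.1 "" then
            (s.1 ++ [s.2.2], s.2.1 + 1, [])
          else
            (s.1, s.2.1, s.2.2 ++ [token]))
        (acc, k, ph)).2.2]
    = acc ++ (gatSpec kept k ts).modifyHead (ph ++ ·) := by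
  induction ts with
  | nil => intro acc k ph; simp [gatSpec]
  | cons t ts ih =>
      intro acc k ph
      simp only [List.foldl_cons, gatSpec]
      split
      · rw [ih]
        cases h : gatSpec kept (k + 1) ts with
        | nil => exact absurd h (gatSpec_ne_nil _ _ _)
        | cons hd tl => simp [List.modifyHead]
      · rw [ih]
        cases h : gatSpec kept k ts with
        | nil => exact absurd h (gatSpec_ne_nil _ _ _)
        | cons hd tl => simp [List.modifyHead]

-- split indices, Nat model
def gatSplits (kept : List String) (k : Nat) (i : Nat) : List String → List Nat
  | [] => []
  | t :: ts =>
      if k < kept.length ∧ t = kept.getD k "" then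
        i :: gatSplits kept (k + 1) (i + 1) ts
      else
        gatSplits kept k (i + 1) ts

-- build pass, Nat model
def gatBuild (tgt : List String) (start : Nat) : List Nat → List (List String)
  | [] => [tgt.drop start]
  | p :: ps => (tgt.drop start).take (p - start) :: gatBuild tgt (p + 1) ps

theorem gatSplits_shift (kept : List String) (ts : List String) :
    ∀ (k i : Nat), gatSplits kept k (i + 1) ts = (gatSplits kept k i ts).map (· + 1) := by
  induction ts with
  | nil => intro k i; simp [gatSplits]
  | cons t ts ih =>
      intro k i
      unfold gatSplits
      split
      · simp [ih]
      · exact ih _ _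

theorem gatBuild_shift (t : String) (ts : List String) (ps : List Nat) :
    ∀ (s : Nat), gatBuild (t :: ts) (s + 1) (ps.map (· + 1)) = gatBuild ts s ps := by
  induction ps with
  | nil => intro s; simp [gatBuild]
  | cons p ps ih =>
      intro s
      simp only [List.map_cons, gatBuild, List.drop_succ_cons, Nat.succ_sub_succ]
      rw [ih]

theorem gatBuild_cons_shift (t : String) (ts : List String) (ps : List Nat) :
    gatBuild (t :: ts) 0 (ps.map (· + 1)) = (gatBuild ts 0 ps).modifyHead (t :: ·) := by
  cases ps with
  | nil => simp [gatBuild, List.modifyHead]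
  | cons p ps =>
      simp only [List.map_cons, gatBuild, List.drop_zero, List.modifyHead, Nat.sub_zero]
      rw [show gatBuild (t :: ts) (p + 1 + 1) (ps.map (· + 1)) = gatBuild ts (p + 1) ps
            from gatBuild_shift t ts ps (p + 1)]
      simp

theorem gatBuild_splits (kept : List String) (ts : List String) :
    ∀ (k : Nat), gatBuild ts 0 (gatSplits kept k 0 ts) = gatSpec kept k ts := by
  induction ts with
  | nil => intro k; simp [gatSplits, gatBuild, gatSpec]
  | cons t ts ih =>
      intro k
      unfold gatSplits gatSpec
      split
      · rw [gatSplits_shift]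
        simp only [gatBuild, List.drop_zero, Nat.sub_self, List.take_zero]
        rw [show gatBuild (t :: ts) (0 + 1) ((gatSplits kept (k + 1) 0 ts).map (· + 1))
              = gatBuild ts 0 (gatSplits kept (k + 1) 0 ts)
              from gatBuild_shift t ts _ 0]
        rw [ih]
      · rw [gatSplits_shift, gatBuild_cons_shift, ih]

-- B's first fold computes (map cast of gatSplits, final kept_idx)
theorem portB_fold1 (kept : List String) (ts : List String) :
    ∀ (i : Nat) (sp : List Int) (k : Nat),
    (PySem.List.enumerate ts (i : Int)).foldl
      (fun (s : List Int × Nat) it =>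
        if s.2 < kept.length ∧ it.2 = kept.getD s.2 "" then
          (s.1 ++ [it.1], s.2 + 1)
        else s)
      (sp, k)
    = (sp ++ (gatSplits kept k i ts).map (Int.ofNat ·),
       ((gatSplits kept k i ts).foldl (fun a _ => a + 1) k)) := by
  induction ts with
  | nil => intro i sp k; simp [PySem.List.enumerate_nil, gatSplits]
  | cons t ts ih =>
      intro i sp k
      rw [PySem.List.enumerate_cons]
      simp only [List.foldl_cons]
      unfold gatSplits
      by_cases h : k < kept.length ∧ t = kept.getD k ""
      · simp only [if_pos h]
        rw [show ((i : Int) + 1) = ((i + 1 : Nat) : Int) by push_cast; ring, ih]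
        simp
      · simp only [if_neg h]
        rw [show ((i : Int) + 1) = ((i + 1 : Nat) : Int) by push_cast; ring, ih]

-- B's second fold equals gatBuild
theorem portB_fold2 (tgt : List String) (ps : List Nat) :
    ∀ (res : List (List String)) (start : Nat),
    ((ps.map (Int.ofNat ·)).foldl
        (fun (s : List (List String) × Int) p =>
          (s.1 ++ [PySem.List.slice tgt (some s.2) (some p)], p + 1))
        (res, (start : Int))).1
    ++ [PySem.List.slice tgt
          (some ((ps.map (Int.ofNat ·)).foldl
            (fun (s : List (List String) × Int) p =>
              (s.1 ++ [PySem.List.slice tgt (some s.2) (some p)], p + 1))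
            (res, (start : Int))).2) none]
    = res ++ gatBuild tgt start ps := by
  induction ps with
  | nil =>
      intro res start
      simp [gatBuild, PySem.List.slice_from_natCast]
  | cons p ps ih =>
      intro res start
      simp only [List.map_cons, List.foldl_cons]
      rw [show ((Int.ofNat p) + 1) = ((p + 1 : Nat) : Int) by rw [Int.ofNat_eq_natCast]; push_cast; ring]
      rw [show (Int.ofNat p) = ((p : Nat) : Int) from rfl]
      rw [ih]
      simp [gatBuild, PySem.List.slice_natCast]

-- ===== VERDICT (by name: the statement is the Claim_ definition above) =====
theorem get_added_token_lists_py_spec : Claim_equal_get_added_token_lists_py := by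
  intro kept tgt _
  show get_added_token_lists_py kept tgt = get_added_token_lists_py_alt kept tgt
  unfold get_added_token_lists_py get_added_token_lists_py_alt
  simp only []
  rw [portA_fold]
  have h1 := portB_fold1 kept tgt 0 [] 0
  simp only [Nat.cast_zero, List.nil_append] at h1
  rw [h1]
  simp only []
  have h2 := portB_fold2 tgt (gatSplits kept 0 0 tgt) [] 0
  simp only [Nat.cast_zero, List.nil_append] at h2
  rw [h2, gatBuild_splits]
  cases h : gatSpec kept 0 tgt with
  | nil => exact absurd h (gatSpec_ne_nil _ _ _)
  | cons hd tl => simp [List.modifyHead]
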